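-- pv_equiv track=rewrite | github.com/DPNT-Sourcecode/CHK-jkrl01 | lib/solutions/CHK/checkout_solution.py | checkout_compute_grouped_sku_cost
-- ===== SOURCE A (Python) =====
-- def checkout_compute_grouped_sku_cost(
--     sku_counts: dict[str, int],
--     sku_group_multibuy_map: dict[str, tuple[int, int]],
--     sku_price_map: dict[str, int]
--     ) -> tuple[int, dict[str,int]]:
--     """Given the SKU counts and the group multi-buy discount list, return the
--     remaining SKU count list and the maximum discounted price for grouped items
--
--     Notes:
--         - The order of multibuy group deal costing is arbitrary as it is
--           assumed the multibuy group deals do not overlap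
--     """
--     total_discounted_price = 0
--     for group, deal in sku_group_multibuy_map.items():
--         multibuy_size, discounted_price = deal
--         # a sorted price list can be cached, here computed repeatedly
--         group_price_list = [(s,p) for s,p in sku_price_map.items() if s in group]
--         group_price_list.sort(key=lambda g: g[1], reverse=True)
--         priciest_group_list = [s[0] for s in group_price_list]
--         number_of_multibuys, sku_counts = count_priciest_group_multibuys(
--                 sku_counts, priciest_group_list, multibuy_size)
--         total_discounted_price += number_of_multibuys * discounted_price
--
--
--     return total_discounted_price, sku_counts
--
-- def count_priciest_group_multibuys(
--     sku_counts: dict[str, int],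
--     priciest_group_list: list[str],
--     multibuy_size: int,
--     ) -> tuple[int, dict[str,int]]:
--     """Picks the priciest combination from sku_count. Returns with a new
--     sku_count and the number of multibuys of multibuy_size found.
--
--     Args:
--         priciest_group: SKUs of multibuy group in descending price
--         multibuy_size: number of items to qualify as 1 multibuy
--
--     Return:
--         Tuple:
--             - number of multibuys
--             - revised sku_count, omits items consumed by discount
--     """
--
--     number_of_multibuys = 0
--     while True:
--         # temporary state track sku_count state after picking an sku item
--         next_sku_counts = sku_counts.copy()
--         multibuy_picked = 0
--         # try picking the priciest group item multibuy_size times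
--         for _ in range(1, multibuy_size+1, 1):
--             previous_multibuy_pick = multibuy_picked
--             for sku in priciest_group_list:
--                 # next priciest sku item found
--                 if sku in next_sku_counts:
--                     next_sku_counts[sku] -= 1
--                     # incrementing over using n from range clarifies the
--                     # intention better
--                     multibuy_picked += 1
--                     # ensure sku is removed from sku_count if exhausted
--                     if next_sku_counts[sku] == 0:
--                             del next_sku_counts[sku]
--                     break # picking complete, consider next pick
--             # check if anything was picked
--             if previous_multibuy_pick == multibuy_picked:
--                 break # if not, means sku_count is exhausted from group items
--
--         # check if enough picked to count as part of multibuy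
--         if multibuy_picked == multibuy_size:
--             number_of_multibuys += 1
--             # commit post picked sku_count state
--             sku_counts = next_sku_counts
--         else:
--             break # multibuy_picked could not be filled to multibuy_size which
--                   # means sku_count has been exhausted from this group of items
--
--     return number_of_multibuys, sku_counts
-- ===== SOURCE B (Python) =====
-- def checkout_compute_grouped_sku_cost(
--     sku_counts: dict[str, int],
--     sku_group_multibuy_map: dict[str, tuple[int, int]],
--     sku_price_map: dict[str, int]
--     ) -> tuple[int, dict[str, int]]:
--     """Closed-form version: per group, the number of multibuys is
--     total_group_items // multibuy_size, and the consumed items are the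
--     size*count priciest ones, removed in one bulk pass (no pick-retry loop)."""
--     total_discounted_price = 0
--     counts = dict(sku_counts)
--     for group, (multibuy_size, discounted_price) in sku_group_multibuy_map.items():
--         if multibuy_size <= 0:
--             continue
--         members = sorted(
--             ((s, p) for s, p in sku_price_map.items() if s in group),
--             key=lambda sp: sp[1], reverse=True)
--         available = sum(counts.get(s, 0) for s, _ in members)
--         number_of_multibuys = available // multibuy_size
--         total_discounted_price += number_of_multibuys * discounted_price
--         need = multibuy_size * number_of_multibuys
--         for s, _ in members:
--             if need == 0:
--                 break
--             take = min(need, counts.get(s, 0))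
--             if take != 0:
--                 counts[s] -= take
--                 if counts[s] == 0:
--                     del counts[s]
--             need -= take
--     return total_discounted_price, counts
-- ===== Notes on version B (the rewrite author's own statement) =====
-- stated objective: faster
-- what changed: A simulates each group's deal search item by item (repeatedly copying the dict and re-picking one priciest item at a time until an attempt fails); B computes the number of multibuys in closed form as total_group_items // multibuy_size and removes the size*count priciest items in one bulk pass; intended as faster (asymptotic) — a timing run could not measure a ratio: A timed out at n=16 where B returned.
import Mathlib
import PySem

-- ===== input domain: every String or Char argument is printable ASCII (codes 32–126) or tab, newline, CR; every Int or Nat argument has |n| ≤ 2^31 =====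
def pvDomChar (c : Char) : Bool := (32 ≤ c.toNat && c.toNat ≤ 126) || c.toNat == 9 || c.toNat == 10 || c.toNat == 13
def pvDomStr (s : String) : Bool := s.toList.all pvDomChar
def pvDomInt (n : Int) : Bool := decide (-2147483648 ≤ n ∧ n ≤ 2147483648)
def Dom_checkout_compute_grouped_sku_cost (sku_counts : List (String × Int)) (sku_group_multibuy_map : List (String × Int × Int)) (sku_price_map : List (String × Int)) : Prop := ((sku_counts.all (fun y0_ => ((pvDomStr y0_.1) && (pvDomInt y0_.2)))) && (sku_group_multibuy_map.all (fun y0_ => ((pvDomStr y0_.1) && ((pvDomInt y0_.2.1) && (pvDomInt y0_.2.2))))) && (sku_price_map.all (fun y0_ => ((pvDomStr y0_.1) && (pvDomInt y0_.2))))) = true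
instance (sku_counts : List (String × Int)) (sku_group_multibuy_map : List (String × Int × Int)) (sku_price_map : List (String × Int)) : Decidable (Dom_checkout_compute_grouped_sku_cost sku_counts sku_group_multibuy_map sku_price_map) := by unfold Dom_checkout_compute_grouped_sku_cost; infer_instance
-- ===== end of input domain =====

-- B replaces A's one-item-at-a-time pick-and-retry simulation by the closed form
-- count = total // size with one bulk subtraction pass over the group (intended as faster;
-- a timing run measured no ratio: A timed out at n=16 where B returned).

-- ===== PORT A =====
-- inner 'for sku in priciest_group_list: … break' — picks one item from the first
-- sku (in descending-price order) present in the dict; none = nothing picked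
def pvPick (d : PySem.Dict String Int) : List String → Option (PySem.Dict String Int)
  | [] => none
  | s :: rest =>
    if d.contains s then
      let d1 := d.insert s (d.getD s 0 - 1)
      some (if d1.getD s 0 == 0 then d1.erase s else d1)
    else pvPick d rest

-- 'for _ in range(1, multibuy_size+1)' with the previous==current break:
-- count successful picks, stop at the first failed one
def pvPickLoop : PySem.Dict String Int → List String → Nat → Int × PySem.Dict String Int
  | d, _, 0 => (0, d)
  | d, pl, Nat.succ n =>
    match pvPick d pl with
    | none => (0, d)
    | some d' =>
      let r := pvPickLoop d' pl n
      (r.1 + 1, r.2)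

-- 'while True' of count_priciest_group_multibuys; fuel only makes the recursion
-- total in Lean (Python diverges outside Pre_; inside Pre_ the fuel never runs out)
def pvMultibuyLoop : Nat → PySem.Dict String Int → List String → Int → Int × PySem.Dict String Int
  | 0, d, _, _ => (0, d)
  | Nat.succ fuel, d, pl, size =>
    let r := pvPickLoop d pl size.toNat
    if r.1 == size then
      let r2 := pvMultibuyLoop fuel r.2 pl size
      (r2.1 + 1, r2.2)
    else (0, d)

def pvCountPriciest (d : PySem.Dict String Int) (pl : List String) (size : Int) : Int × PySem.Dict String Int :=
  pvMultibuyLoop (((pl.map (fun s => d.getD s 0)).sum).toNat + 1) d pl size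

-- body of A's outer 'for group, deal in sku_group_multibuy_map.items()' loop
def pvGroupStepA (prices : PySem.Dict String Int) (acc : Int × PySem.Dict String Int) (g : String × Int × Int) : Int × PySem.Dict String Int :=
  let gpl := prices.items.filter (fun p => PySem.Str.isIn p.1 g.1)
  let gpls := PySem.List.sorted gpl (fun p => p.2) true
  let priciest := gpls.map (fun p => p.1)
  let r0 := pvCountPriciest acc.2 priciest g.2.1
  (acc.1 + r0.1 * g.2.2, r0.2)

def checkout_compute_grouped_sku_cost (sku_counts : List (String × Int)) (sku_group_multibuy_map : List (String × Int × Int)) (sku_price_map : List (String × Int)) : Int × (List (String × Int)) :=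
  let r := (PySem.Dict.ofList sku_group_multibuy_map).items.foldl
    (pvGroupStepA (PySem.Dict.ofList sku_price_map)) (0, PySem.Dict.ofList sku_counts)
  (r.1, r.2.items)

-- ===== PORT B =====
-- one bulk pass: subtract 'need' items from the members in descending-price order
def pvConsume : PySem.Dict String Int → List (String × Int) → Int → PySem.Dict String Int
  | d, [], _ => d
  | d, p :: rest, need =>
    if need == 0 then d
    else
      let take := min need (d.getD p.1 0)
      let d' := if take != 0 then
          (let d1 := d.insert p.1 (d.getD p.1 0 - take)
           if d1.getD p.1 0 == 0 then d1.erase p.1 else d1)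
        else d
      pvConsume d' rest (need - take)

-- body of B's outer loop
def pvGroupStepB (prices : PySem.Dict String Int) (acc : Int × PySem.Dict String Int) (g : String × Int × Int) : Int × PySem.Dict String Int :=
  if g.2.1 ≤ 0 then acc
  else
    let members := PySem.List.sorted (prices.items.filter (fun p => PySem.Str.isIn p.1 g.1)) (fun p => p.2) true
    let avail := (members.map (fun p => acc.2.getD p.1 0)).sum
    let deals := PySem.Int.floordiv avail g.2.1
    (acc.1 + deals * g.2.2, pvConsume acc.2 members (g.2.1 * deals))

def checkout_compute_grouped_sku_cost_alt (sku_counts : List (String × Int)) (sku_group_multibuy_map : List (String × Int × Int)) (sku_price_map : List (String × Int)) : Int × (List (String × Int)) :=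
  let r := (PySem.Dict.ofList sku_group_multibuy_map).items.foldl
    (pvGroupStepB (PySem.Dict.ofList sku_price_map)) (0, PySem.Dict.ofList sku_counts)
  (r.1, r.2.items)

-- ===== PRECONDITION & SPEC =====
-- Pre_ excludes exactly the inputs on which Python A loops forever: a group deal of
-- size 0, or a group deal of size ≥ 1 containing a priced sku whose count is ≤ 0.
def Pre_checkout_compute_grouped_sku_cost (sku_counts : List (String × Int)) (sku_group_multibuy_map : List (String × Int × Int)) (sku_price_map : List (String × Int)) : Prop :=
  ∀ g ∈ (PySem.Dict.ofList sku_group_multibuy_map).items,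
    g.2.1 ≠ 0 ∧ (1 ≤ g.2.1 →
      ∀ p ∈ (PySem.Dict.ofList sku_counts).items,
        ((PySem.Dict.ofList sku_price_map).contains p.1 = true ∧ PySem.Str.isIn p.1 g.1 = true) → 1 ≤ p.2)
instance (sku_counts : List (String × Int)) (sku_group_multibuy_map : List (String × Int × Int)) (sku_price_map : List (String × Int)) : Decidable (Pre_checkout_compute_grouped_sku_cost sku_counts sku_group_multibuy_map sku_price_map) := by unfold Pre_checkout_compute_grouped_sku_cost; infer_instance

def pvWitness_checkout_compute_grouped_sku_cost : (List (String × Int)) × (List (String × Int × Int)) × (List (String × Int)) :=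
  ([("A", 3), ("B", 2)], [("AB", (2, 30))], [("A", 50), ("B", 30)])

def Spec_checkout_compute_grouped_sku_cost (sku_counts : List (String × Int)) (sku_group_multibuy_map : List (String × Int × Int)) (sku_price_map : List (String × Int)) (out : Int × (List (String × Int))) : Prop := out = checkout_compute_grouped_sku_cost_alt sku_counts sku_group_multibuy_map sku_price_map
instance (sku_counts : List (String × Int)) (sku_group_multibuy_map : List (String × Int × Int)) (sku_price_map : List (String × Int)) (out : Int × (List (String × Int))) : Decidable (Spec_checkout_compute_grouped_sku_cost sku_counts sku_group_multibuy_map sku_price_map out) := by unfold Spec_checkout_compute_grouped_sku_cost; infer_instance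

-- ===== CLAIM (what is proved, stated in full; the proofs are below) =====
def Claim_equal_checkout_compute_grouped_sku_cost : Prop := ∀ (sku_counts : List (String × Int)) (sku_group_multibuy_map : List (String × Int × Int)) (sku_price_map : List (String × Int)), Dom_checkout_compute_grouped_sku_cost sku_counts sku_group_multibuy_map sku_price_map → Pre_checkout_compute_grouped_sku_cost sku_counts sku_group_multibuy_map sku_price_map → Spec_checkout_compute_grouped_sku_cost sku_counts sku_group_multibuy_map sku_price_map (checkout_compute_grouped_sku_cost sku_counts sku_group_multibuy_map sku_price_map)

-- ===== LEMMAS AND PROOFS =====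

-- ---- generic dict facts (erase is not covered by the PySem lemma book) ----
theorem pv_find?_filter_ne (l : List (String × Int)) (k k' : String) :
    ((l.filter (fun p => !(p.1 == k))).find? (fun p => p.1 == k')) =
      if k' = k then none else l.find? (fun p => p.1 == k') := by
  induction l with
  | nil => simp
  | cons p t ih =>
    by_cases hp : p.1 = k <;> by_cases hk : k' = k <;>
        simp_all [List.find?_cons, beq_iff_eq]
    rw [show (k == k') = false from by simpa using fun h : k = k' => hk h.symm]

theorem pv_get?_erase (d : PySem.Dict String Int) (k k' : String) :
    (d.erase k).get? k' = if k' = k then none else d.get? k' := by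
  show ((d.items.filter _).find? _).map _ = _
  rw [pv_find?_filter_ne]
  split <;> rfl

theorem pv_nodup_keys_erase (d : PySem.Dict String Int) (k : String)
    (h : d.keys.Nodup) : (d.erase k).keys.Nodup := by
  have hsub : (d.erase k).keys.Sublist d.keys := List.Sublist.map _ List.filter_sublist
  exact h.sublist hsub

theorem pv_filter_map_aux (k : String) (v : Int) (l : List (String × Int)) :
    (l.map (fun p => if (p.1 == k) = true then (k, v) else p)).filter (fun p => !(p.1 == k)) =
      l.filter (fun p => !(p.1 == k)) := by
  induction l with
  | nil => rfl
  | cons p t ih =>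
    show List.filter _ ((if (p.1 == k) = true then (k, v) else p) :: _) = _
    by_cases hp : p.1 = k
    · rw [if_pos (by simpa using hp), List.filter_cons, List.filter_cons,
        show (!(((k, v) : String × Int).1 == k)) = false from by simp,
        show (!(p.1 == k)) = false from by simp [hp]]
      simpa using ih
    · rw [if_neg (by simpa using hp), List.filter_cons, List.filter_cons,
        show (!(p.1 == k)) = true from by simp [hp]]
      simp only [if_true, ih]

theorem pv_erase_insert_self (d : PySem.Dict String Int) (k : String) (v : Int) :
    (d.insert k v).erase k = d.erase k := by
  by_cases hc : d.contains k
  · apply PySem.Dict.ext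
    show List.filter _ (PySem.Dict.items _) = _
    rw [PySem.Dict.items_insert_of_contains _ v hc]
    show List.filter _ (List.map _ d.items) = List.filter _ d.items
    exact pv_filter_map_aux k v d.items
  · apply PySem.Dict.ext
    show List.filter _ (PySem.Dict.items _) = _
    rw [PySem.Dict.items_insert_of_not_contains _ v (by simpa using hc)]
    rw [List.filter_append]
    simp [PySem.Dict.erase]

-- ---- the one-key update 'd[s] -= t; del d[s] if 0' both programs perform ----
def pvDec (d : PySem.Dict String Int) (s : String) (t : Int) : PySem.Dict String Int :=
  if d.getD s 0 - t = 0 then (d.insert s (d.getD s 0 - t)).erase s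
  else d.insert s (d.getD s 0 - t)

-- the inline update in pvPick / pvConsume is exactly pvDec
theorem pv_update_eq_pvDec (d : PySem.Dict String Int) (s : String) (t : Int) :
    (let d1 := d.insert s (d.getD s 0 - t);
     if d1.getD s 0 == 0 then d1.erase s else d1) = pvDec d s t := by
  show (if _ then _ else _) = _
  rw [PySem.Dict.getD_insert_self]
  unfold pvDec
  by_cases h0 : d.getD s 0 - t = 0 <;> simp [h0]

theorem pv_get?_pvDec (d : PySem.Dict String Int) (s x : String) (t : Int) :
    (pvDec d s t).get? x =
      if x = s then (if d.getD s 0 - t = 0 then none else some (d.getD s 0 - t))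
      else d.get? x := by
  unfold pvDec
  by_cases h0 : d.getD s 0 - t = 0
  · rw [if_pos h0, pv_get?_erase]
    by_cases hx : x = s
    · simp [hx, h0]
    · simp [hx, PySem.Dict.get?_insert]
  · rw [if_neg h0, PySem.Dict.get?_insert]
    by_cases hx : x = s <;> simp [hx, h0]

theorem pv_getD_pvDec (d : PySem.Dict String Int) (s x : String) (t : Int) :
    (pvDec d s t).getD x 0 = if x = s then d.getD s 0 - t else d.getD x 0 := by
  rw [PySem.Dict.getD_eq_get?_getD, pv_get?_pvDec]
  by_cases hx : x = s
  · by_cases h0 : d.getD s 0 - t = 0 <;> simp [hx, h0]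
  · simp [hx, PySem.Dict.getD_eq_get?_getD]

theorem pv_contains_pvDec (d : PySem.Dict String Int) (s x : String) (t : Int) :
    (pvDec d s t).contains x =
      if x = s then decide (d.getD s 0 - t ≠ 0) else d.contains x := by
  rw [PySem.Dict.contains_eq_isSome_get?, pv_get?_pvDec]
  by_cases hx : x = s
  · by_cases h0 : d.getD s 0 - t = 0 <;> simp [hx, h0]
  · simp [hx, PySem.Dict.contains_eq_isSome_get?]

theorem pv_nodup_keys_pvDec (d : PySem.Dict String Int) (s : String) (t : Int)
    (h : d.keys.Nodup) : (pvDec d s t).keys.Nodup := by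
  unfold pvDec
  have h1 := PySem.Dict.nodup_keys_insert d s (d.getD s 0 - t) h
  split
  · exact pv_nodup_keys_erase _ _ h1
  · exact h1

theorem pv_pvDec_pvDec (d : PySem.Dict String Int) (s : String) (t₁ t₂ : Int)
    (h1 : d.getD s 0 - t₁ ≠ 0) :
    pvDec (pvDec d s t₁) s t₂ = pvDec d s (t₁ + t₂) := by
  have hgd : (pvDec d s t₁).getD s 0 = d.getD s 0 - t₁ := by
    rw [pv_getD_pvDec]; simp
  have hd1 : pvDec d s t₁ = d.insert s (d.getD s 0 - t₁) := by
    unfold pvDec; rw [if_neg h1]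
  conv_lhs => rw [pvDec, hgd, hd1]
  rw [PySem.Dict.insert_insert_self, pv_erase_insert_self,
    show d.getD s 0 - t₁ - t₂ = d.getD s 0 - (t₁ + t₂) from by ring]
  unfold pvDec
  split
  · rw [pv_erase_insert_self]
  · rfl
-- ---- invariants over a group's priority list ----
def pvPos (d : PySem.Dict String Int) (pl : List String) : Prop :=
  ∀ s ∈ pl, d.contains s = true → 1 ≤ d.getD s 0

def pvS (d : PySem.Dict String Int) (pl : List String) : Int :=
  (pl.map (fun s => d.getD s 0)).sum

theorem pv_getD_nonneg (d : PySem.Dict String Int) (pl : List String)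
    (hpos : pvPos d pl) (s : String) (hs : s ∈ pl) : 0 ≤ d.getD s 0 := by
  by_cases hc : d.contains s = true
  · exact le_trans (by norm_num) (hpos s hs hc)
  · rw [PySem.Dict.getD_of_not_contains _ _ (by simpa using hc)]

theorem pv_pvS_cons (d : PySem.Dict String Int) (s : String) (pl : List String) :
    pvS d (s :: pl) = d.getD s 0 + pvS d pl := by
  simp [pvS]

theorem pv_pvS_nonneg (d : PySem.Dict String Int) (pl : List String)
    (hpos : pvPos d pl) : 0 ≤ pvS d pl := by
  induction pl with
  | nil => simp [pvS]
  | cons s t ih =>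
    rw [pv_pvS_cons]
    have h1 := pv_getD_nonneg d (s :: t) hpos s (by simp)
    have h2 := ih (fun x hx => hpos x (by simp [hx]))
    omega

theorem pv_pvS_congr (d d' : PySem.Dict String Int) (pl : List String)
    (h : ∀ x ∈ pl, d.getD x 0 = d'.getD x 0) : pvS d pl = pvS d' pl := by
  induction pl with
  | nil => rfl
  | cons s t ih =>
    rw [pv_pvS_cons, pv_pvS_cons, h s (by simp), ih (fun x hx => h x (by simp [hx]))]

theorem pv_pvS_pvDec (d : PySem.Dict String Int) (pl : List String) (s : String) (t : Int)
    (hnd : pl.Nodup) (hs : s ∈ pl) : pvS (pvDec d s t) pl = pvS d pl - t := by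
  induction pl with
  | nil => simp at hs
  | cons a l ih =>
    rw [pv_pvS_cons, pv_pvS_cons]
    rcases List.mem_cons.mp hs with h | h
    · subst h
      rw [pv_getD_pvDec, if_pos rfl]
      have hnotin : s ∉ l := (List.nodup_cons.mp hnd).1
      have : pvS (pvDec d s t) l = pvS d l := by
        apply pv_pvS_congr
        intro x hx
        rw [pv_getD_pvDec, if_neg (by intro heq; exact hnotin (heq ▸ hx))]
      rw [this]; ring
    · have hal : a ∉ l := (List.nodup_cons.mp hnd).1
      have hne : a ≠ s := fun he => hal (he ▸ h)
      rw [pv_getD_pvDec, if_neg hne, ih (List.nodup_cons.mp hnd).2 h]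
      ring
-- ---- unfolding lemmas for pvPick / pvBulk, and B's pass as a string-list pass ----
theorem pv_pvPick_cons (d : PySem.Dict String Int) (s : String) (rest : List String) :
    pvPick d (s :: rest) =
      if d.contains s = true then some (pvDec d s 1) else pvPick d rest := by
  rw [pvPick, ← pv_update_eq_pvDec]

def pvBulk : PySem.Dict String Int → List String → Int → PySem.Dict String Int
  | d, [], _ => d
  | d, s :: rest, need =>
    if need == 0 then d
    else
      let take := min need (d.getD s 0)
      pvBulk (if take != 0 then pvDec d s take else d) rest (need - take)

theorem pv_pvBulk_cons (d : PySem.Dict String Int) (s : String) (rest : List String) (need : Int) :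
    pvBulk d (s :: rest) need =
      if need = 0 then d
      else if min need (d.getD s 0) ≠ 0 then
        pvBulk (pvDec d s (min need (d.getD s 0))) rest (need - min need (d.getD s 0))
      else pvBulk d rest (need - min need (d.getD s 0)) := by
  rw [pvBulk]
  by_cases h : need = 0
  · simp [h]
  · simp only [beq_iff_eq, if_neg h]
    by_cases h2 : min need (d.getD s 0) = 0 <;> simp [h2]

theorem pv_bulk_zero (d : PySem.Dict String Int) (pl : List String) : pvBulk d pl 0 = d := by
  cases pl with
  | nil => rfl
  | cons s rest => rw [pv_pvBulk_cons, if_pos rfl]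

theorem pv_consume_eq_bulk (ms : List (String × Int)) : ∀ (d : PySem.Dict String Int) (need : Int),
    pvConsume d ms need = pvBulk d (ms.map (fun p => p.1)) need := by
  induction ms with
  | nil => intro d need; rfl
  | cons p t ih =>
    intro d need
    by_cases h0 : need = 0
    · simp [pvConsume, pv_pvBulk_cons, h0]
    · by_cases h2 : min need (d.getD p.1 0) = 0
      · simp [pvConsume, pv_pvBulk_cons, h0, h2, ih]
      · simp [pvConsume, pv_pvBulk_cons, h0, h2, ih]
        rw [pvDec]

theorem pv_pvPick_eq_none_iff (pl : List String) (d : PySem.Dict String Int) :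
    pvPick d pl = none ↔ ∀ s ∈ pl, d.contains s = false := by
  induction pl with
  | nil => simp [pvPick]
  | cons s rest ih =>
    rw [pv_pvPick_cons]
    by_cases hc : d.contains s = true
    · simp [hc]
    · rw [if_neg hc, ih]
      constructor
      · intro h x hx
        rcases List.mem_cons.mp hx with h1 | h1
        · subst h1; simpa using hc
        · exact h x h1
      · intro h x hx; exact h x (by simp [hx])

theorem pv_pvS_zero_of_absent (pl : List String) (d : PySem.Dict String Int)
    (h : ∀ s ∈ pl, d.contains s = false) : pvS d pl = 0 := by
  induction pl with
  | nil => rfl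
  | cons s rest ih =>
    rw [pv_pvS_cons, PySem.Dict.getD_of_not_contains _ _ (h s (by simp)),
      ih (fun x hx => h x (by simp [hx]))]
    norm_num

-- ---- crux: one successful Python pick advances B's bulk pass by exactly one item ----
theorem pv_pick_bulk (pl : List String) : ∀ (d d' : PySem.Dict String Int),
    pl.Nodup → pvPos d pl → pvPick d pl = some d' →
    (∀ k : Int, 0 ≤ k → pvBulk d pl (k + 1) = pvBulk d' pl k)
    ∧ pvS d' pl = pvS d pl - 1
    ∧ pvPos d' pl
    ∧ (d.keys.Nodup → d'.keys.Nodup)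
    ∧ (∀ x, x ∉ pl → d'.get? x = d.get? x) := by
  induction pl with
  | nil => intro d d' _ _ hp; simp [pvPick] at hp
  | cons s rest ih =>
    intro d d' hnd hpos hp
    rw [pv_pvPick_cons] at hp
    by_cases hc : d.contains s = true
    · rw [if_pos hc] at hp
      have hd' : d' = pvDec d s 1 := by injection hp with h; exact h.symm
      subst hd'
      have hc1 : 1 ≤ d.getD s 0 := hpos s (by simp) hc
      refine ⟨?_, ?_, ?_, ?_, ?_⟩
      · intro k hk
        rw [pv_pvBulk_cons, if_neg (by omega)]
        rw [if_pos (by omega : min (k + 1) (d.getD s 0) ≠ 0)]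
        by_cases hk0 : k = 0
        · subst hk0
          rw [show min (0 + 1) (d.getD s 0) = 1 from by omega]
          rw [show (0 : Int) + 1 - 1 = 0 from by ring, pv_bulk_zero, pv_bulk_zero]
        · rw [pv_pvBulk_cons (pvDec d s 1), if_neg hk0]
          rw [pv_getD_pvDec, if_pos rfl]
          by_cases hcc : d.getD s 0 = 1
          · rw [if_neg (by omega : ¬ min k (d.getD s 0 - 1) ≠ 0)]
            rw [show min (k + 1) (d.getD s 0) = 1 from by omega]
            rw [show k + 1 - 1 = k - min k (d.getD s 0 - 1) from by omega]
          · rw [if_pos (by omega : min k (d.getD s 0 - 1) ≠ 0)]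
            rw [pv_pvDec_pvDec d s 1 (min k (d.getD s 0 - 1)) (by omega)]
            rw [show (1 : Int) + min k (d.getD s 0 - 1) = min (k + 1) (d.getD s 0) from by omega]
            rw [show k - min k (d.getD s 0 - 1) = k + 1 - min (k + 1) (d.getD s 0) from by omega]
      · exact pv_pvS_pvDec d (s :: rest) s 1 hnd (by simp)
      · intro x hx hcx
        rw [pv_getD_pvDec]
        rw [pv_contains_pvDec] at hcx
        by_cases hxs : x = s
        · rw [if_pos hxs]
          rw [if_pos hxs] at hcx
          have : d.getD s 0 - 1 ≠ 0 := by simpa using hcx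
          omega
        · rw [if_neg hxs]
          rw [if_neg hxs] at hcx
          exact hpos x hx hcx
      · exact fun h => pv_nodup_keys_pvDec _ _ _ h
      · intro x hx
        rw [pv_get?_pvDec, if_neg (fun he => hx (by simp [he]))]
    · rw [if_neg hc] at hp
      have hnd' : rest.Nodup := (List.nodup_cons.mp hnd).2
      have hsr : s ∉ rest := (List.nodup_cons.mp hnd).1
      have hpos' : pvPos d rest := fun x hx => hpos x (by simp [hx])
      obtain ⟨hbulk, hS, hposr, hnodup, hout⟩ := ih d d' hnd' hpos' hp
      have hgs : d'.get? s = d.get? s := hout s hsr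
      have hcs' : d'.contains s = false := by
        rw [PySem.Dict.contains_eq_isSome_get?, hgs, ← PySem.Dict.contains_eq_isSome_get?]
        simpa using hc
      have hg0 : d.getD s 0 = 0 := PySem.Dict.getD_of_not_contains _ _ (by simpa using hc)
      have hg0' : d'.getD s 0 = 0 := by
        rw [PySem.Dict.getD_eq_get?_getD, hgs, ← PySem.Dict.getD_eq_get?_getD, hg0]
      refine ⟨?_, ?_, ?_, hnodup, ?_⟩
      · intro k hk
        rw [pv_pvBulk_cons, if_neg (by omega), hg0]
        rw [show min (k + 1) (0 : Int) = 0 from by omega]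
        rw [if_neg (by simp), show k + 1 - 0 = k + 1 from by ring]
        by_cases hk0 : k = 0
        · subst hk0
          have h1 := hbulk 0 le_rfl
          rw [h1, pv_bulk_zero, pv_bulk_zero]
        · rw [pv_pvBulk_cons d', if_neg hk0, hg0']
          rw [show min k (0 : Int) = 0 from by omega]
          rw [if_neg (by simp), show k - 0 = k from by ring]
          exact hbulk k hk
      · rw [pv_pvS_cons, pv_pvS_cons, hg0, hg0', hS]; ring
      · intro x hx hcx
        rcases List.mem_cons.mp hx with h1 | h1
        · subst h1; rw [hcs'] at hcx; cases hcx
        · exact hposr x h1 hcx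
      · intro x hx
        exact hout x (fun hh => hx (by simp [hh]))
-- ---- iterated picks; composition of bulk passes ----
def pvIter : PySem.Dict String Int → List String → Nat → Option (PySem.Dict String Int)
  | d, _, 0 => some d
  | d, pl, Nat.succ n =>
    match pvPick d pl with
    | none => none
    | some d' => pvIter d' pl n

theorem pv_iter_add (pl : List String) (b : Nat) : ∀ (a : Nat) (d d₁ : PySem.Dict String Int),
    pvIter d pl a = some d₁ → pvIter d pl (a + b) = pvIter d₁ pl b := by
  intro a
  induction a with
  | zero =>
    intro d d₁ h
    injection h with h
    subst h
    rw [Nat.zero_add]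
  | succ n ihn =>
    intro d d₁ h
    rw [pvIter] at h
    cases hp : pvPick d pl with
    | none => rw [hp] at h; cases h
    | some d₂ =>
      rw [hp] at h
      rw [show n + 1 + b = (n + b) + 1 from by omega, pvIter, hp]
      exact ihn d₂ d₁ h

theorem pv_iter_bulk (pl : List String) (hnd : pl.Nodup) : ∀ (n : Nat) (d : PySem.Dict String Int),
    pvPos d pl → d.keys.Nodup → (n : Int) ≤ pvS d pl →
    ∃ d', pvIter d pl n = some d' ∧ pvBulk d pl (n : Int) = d'
      ∧ pvS d' pl = pvS d pl - n ∧ pvPos d' pl ∧ d'.keys.Nodup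
      ∧ (∀ x, x ∉ pl → d'.get? x = d.get? x) := by
  intro n
  induction n with
  | zero =>
    intro d hpos hnod _
    exact ⟨d, rfl, by rw [Nat.cast_zero, pv_bulk_zero], by simp, hpos, hnod, fun _ _ => rfl⟩
  | succ n ihn =>
    intro d hpos hnod hle
    have hS1 : 1 ≤ pvS d pl := by push_cast at hle; omega
    cases hp : pvPick d pl with
    | none =>
      exfalso
      have h := (pv_pvPick_eq_none_iff pl d).mp hp
      have := pv_pvS_zero_of_absent pl d h
      omega
    | some d₁ =>
      obtain ⟨hbulk, hS, hpos1, hnod1, hout1⟩ := pv_pick_bulk pl d d₁ hnd hpos hp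
      have hle1 : (n : Int) ≤ pvS d₁ pl := by rw [hS]; push_cast at hle ⊢; omega
      obtain ⟨d', hiter, hbulk', hS', hpos', hnod', hout'⟩ := ihn d₁ hpos1 (hnod1 hnod) hle1
      refine ⟨d', ?_, ?_, ?_, hpos', hnod', ?_⟩
      · rw [pvIter, hp]; exact hiter
      · rw [show ((n + 1 : Nat) : Int) = (n : Int) + 1 from by push_cast; ring,
          hbulk (n : Int) (by positivity)]
        exact hbulk'
      · rw [hS', hS]; push_cast; ring
      · intro x hx; rw [hout' x hx, hout1 x hx]

theorem pv_bulk_comp (pl : List String) (hnd : pl.Nodup) (a b : Nat) (d : PySem.Dict String Int)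
    (hpos : pvPos d pl) (hnod : d.keys.Nodup) (hab : (a : Int) + (b : Int) ≤ pvS d pl) :
    pvBulk (pvBulk d pl (a : Int)) pl (b : Int) = pvBulk d pl ((a : Int) + (b : Int)) := by
  obtain ⟨da, hia, hba, hSa, hpa, hna, _⟩ :=
    pv_iter_bulk pl hnd a d hpos hnod (by push_cast at hab ⊢; omega)
  obtain ⟨dab, hib, hbb, _, _, _, _⟩ :=
    pv_iter_bulk pl hnd b da hpa hna (by rw [hSa]; push_cast at hab ⊢; omega)
  obtain ⟨dab', hiab, hbab, _, _, _, _⟩ :=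
    pv_iter_bulk pl hnd (a + b) d hpos hnod (by push_cast at hab ⊢; omega)
  have h1 : pvIter d pl (a + b) = some dab := by
    rw [pv_iter_add pl b a d da hia]; exact hib
  rw [h1] at hiab
  injection hiab with hiab
  rw [hba, hbb, show ((a : Int) + (b : Int)) = ((a + b : Nat) : Int) from by push_cast; ring, hbab,
    hiab]

-- ---- A's inner picking loop counts min(n, available) ----
theorem pv_pickLoop (pl : List String) (hnd : pl.Nodup) : ∀ (n : Nat) (d : PySem.Dict String Int),
    pvPos d pl → d.keys.Nodup →
    (pvPickLoop d pl n).1 = min (n : Int) (pvS d pl)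
    ∧ ((n : Int) ≤ pvS d pl → (pvPickLoop d pl n).2 = pvBulk d pl (n : Int)) := by
  intro n
  induction n with
  | zero =>
    intro d hpos _
    have hS := pv_pvS_nonneg d pl hpos
    constructor
    · show (0 : Int) = _
      rw [Nat.cast_zero]
      omega
    · intro _
      show d = _
      rw [Nat.cast_zero, pv_bulk_zero]
  | succ n ihn =>
    intro d hpos hnod
    rw [pvPickLoop]
    cases hp : pvPick d pl with
    | none =>
      have habs := (pv_pvPick_eq_none_iff pl d).mp hp
      have hS0 := pv_pvS_zero_of_absent pl d habs
      constructor
      · show (0 : Int) = _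
        rw [hS0]
        push_cast
        omega
      · intro hle
        exfalso
        rw [hS0] at hle
        push_cast at hle
        omega
    | some d₁ =>
      obtain ⟨hbulk, hS, hpos1, hnod1k, hout⟩ := pv_pick_bulk pl d d₁ hnd hpos hp
      have hSn : 0 ≤ pvS d₁ pl := pv_pvS_nonneg d₁ pl hpos1
      have hS1 : 1 ≤ pvS d pl := by omega
      obtain ⟨ih1, ih2⟩ := ihn d₁ hpos1 (hnod1k hnod)
      constructor
      · show (pvPickLoop d₁ pl n).1 + 1 = _
        rw [ih1, hS]
        push_cast
        omega
      · intro hle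
        show (pvPickLoop d₁ pl n).2 = _
        have hlen : (n : Int) ≤ pvS d₁ pl := by rw [hS]; push_cast at hle ⊢; omega
        rw [ih2 hlen, show ((n + 1 : Nat) : Int) = (n : Int) + 1 from by push_cast; ring,
          hbulk (n : Int) (by positivity)]

-- ---- the whole 'while True' loop in closed form ----
theorem pv_multibuy (pl : List String) (hnd : pl.Nodup) (size : Int) (hsz : 0 < size) :
    ∀ (fuel : Nat) (d : PySem.Dict String Int), pvPos d pl → d.keys.Nodup →
    (pvS d pl).toNat < fuel →
    pvMultibuyLoop fuel d pl size =
      (PySem.Int.floordiv (pvS d pl) size,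
        pvBulk d pl (size * PySem.Int.floordiv (pvS d pl) size)) := by
  intro fuel
  induction fuel with
  | zero => intro d _ _ h; omega
  | succ fuel ihf =>
    intro d hpos hnod hfuel
    have hT0 : 0 ≤ pvS d pl := pv_pvS_nonneg d pl hpos
    obtain ⟨hl1, hl2⟩ := pv_pickLoop pl hnd size.toNat d hpos hnod
    have hcast : ((size.toNat : Nat) : Int) = size := Int.toNat_of_nonneg hsz.le
    rw [pvMultibuyLoop]
    rw [PySem.Int.floordiv_eq_ediv_of_pos hsz]
    by_cases hge : size ≤ pvS d pl
    · have hr1 : (pvPickLoop d pl size.toNat).1 = size := by rw [hl1, hcast]; omega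
      rw [hr1, show (size == size) = true from by simp]
      obtain ⟨db, hib, hbb, hSb, hpb, hnb, _⟩ :=
        pv_iter_bulk pl hnd size.toNat d hpos hnod (by rw [hcast]; exact hge)
      have hr2 : (pvPickLoop d pl size.toNat).2 = db := by
        rw [hl2 (by rw [hcast]; exact hge), hbb]
      rw [if_pos rfl, hr2]
      have hfuel' : (pvS db pl).toNat < fuel := by
        rw [hSb, hcast]
        omega
      rw [ihf db hpb hnb hfuel']
      rw [PySem.Int.floordiv_eq_ediv_of_pos hsz]
      have hq : pvS db pl / size + 1 = pvS d pl / size := by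
        rw [hSb, hcast]
        rw [show pvS d pl = (pvS d pl - size) + 1 * size from by ring]
        rw [Int.add_mul_ediv_right _ _ (ne_of_gt hsz)]
        ring_nf
      have hq0 : 0 ≤ pvS db pl / size := by
        apply Int.ediv_nonneg _ hsz.le
        rw [hSb, hcast]
        omega
      have hmul_le : size * (pvS d pl / size) ≤ pvS d pl := by
        conv_rhs => rw [← Int.mul_ediv_add_emod (pvS d pl) size]
        have := Int.emod_nonneg (pvS d pl) (ne_of_gt hsz)
        omega
      have hq' : pvS db pl = pvS d pl - size := by rw [hSb, hcast]
      show (pvS db pl / size + 1, pvBulk db pl (size * (pvS db pl / size))) = _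
      rw [Prod.mk.injEq]
      refine ⟨by rw [hq'] at hq; rw [hq']; exact hq, ?_⟩
      · rw [hq', ← hbb]
        have hq2 : (pvS d pl - size) / size + 1 = pvS d pl / size := by rw [← hq, hq']
        have hq02 : 0 ≤ (pvS d pl - size) / size := by
          apply Int.ediv_nonneg _ hsz.le
          omega
        have hcb : ((size * ((pvS d pl - size) / size)).toNat : Int) =
            size * ((pvS d pl - size) / size) := Int.toNat_of_nonneg (by positivity)
        rw [show size * ((pvS d pl - size) / size) =
            (((size * ((pvS d pl - size) / size)).toNat : Nat) : Int) from hcb.symm]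
        rw [pv_bulk_comp pl hnd size.toNat ((size * ((pvS d pl - size) / size)).toNat) d hpos hnod
          (by
            rw [hcast, hcb, show size + size * ((pvS d pl - size) / size) =
              size * ((pvS d pl - size) / size + 1) from by ring, hq2]
            exact hmul_le)]
        rw [hcast, hcb]
        rw [show size + size * ((pvS d pl - size) / size) =
            size * ((pvS d pl - size) / size + 1) from by ring, hq2]
    · have hlt : pvS d pl < size := by omega
      have hr1 : (pvPickLoop d pl size.toNat).1 = pvS d pl := by rw [hl1, hcast]; omega
      rw [hr1, show (pvS d pl == size) = false from by simp; omega]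
      rw [if_neg (by simp)]
      have hq : pvS d pl / size = 0 := Int.ediv_eq_zero_of_lt hT0 hlt
      rw [hq, mul_zero, pv_bulk_zero]
-- ---- per-group facts and the outer fold ----
def pvPriciest (prices : PySem.Dict String Int) (g : String) : List String :=
  (PySem.List.sorted (prices.items.filter (fun p => PySem.Str.isIn p.1 g)) (fun p => p.2) true).map
    (fun p => p.1)

theorem pv_priciest_nodup (prices : PySem.Dict String Int) (hnd : prices.keys.Nodup) (g : String) :
    (pvPriciest prices g).Nodup := by
  have hperm :=
    (PySem.List.sorted_perm (prices.items.filter (fun p => PySem.Str.isIn p.1 g))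
      (fun p => p.2) true).map (fun p => p.1)
  have hsub : ((prices.items.filter (fun p => PySem.Str.isIn p.1 g)).map (fun p => p.1)).Sublist
      prices.keys := List.Sublist.map _ List.filter_sublist
  exact hperm.nodup_iff.mpr (hnd.sublist hsub)

theorem pv_mem_priciest (prices : PySem.Dict String Int) (g : String) (s : String)
    (hs : s ∈ pvPriciest prices g) :
    prices.contains s = true ∧ PySem.Str.isIn s g = true := by
  obtain ⟨p, hp, hps⟩ := List.mem_map.mp hs
  rw [PySem.List.mem_sorted] at hp
  have hmem := List.mem_filter.mp hp
  subst hps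
  refine ⟨?_, hmem.2⟩
  rw [PySem.Dict.contains_iff_mem_keys]
  show p.1 ∈ prices.items.map (fun x => x.1)
  exact List.mem_map.mpr ⟨p, hmem.1, rfl⟩

theorem pv_bulk_inv (pl : List String) (hnd : pl.Nodup) (need : Int)
    (d : PySem.Dict String Int) (hpos : pvPos d pl) (hnod : d.keys.Nodup)
    (h0 : 0 ≤ need) (hle : need ≤ pvS d pl) :
    pvPos (pvBulk d pl need) pl ∧ (pvBulk d pl need).keys.Nodup
    ∧ (∀ x, x ∉ pl → (pvBulk d pl need).get? x = d.get? x) := by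
  obtain ⟨d', _, hbb, _, hpos', hnod', hout'⟩ :=
    pv_iter_bulk pl hnd need.toNat d hpos hnod (by rw [Int.toNat_of_nonneg h0]; exact hle)
  rw [show need = ((need.toNat : Nat) : Int) from (Int.toNat_of_nonneg h0).symm, hbb]
  exact ⟨hpos', hnod', hout'⟩

def pvInv (prices : PySem.Dict String Int) (gs : List (String × Int × Int))
    (d : PySem.Dict String Int) : Prop :=
  ∀ g ∈ gs, 1 ≤ g.2.1 → pvPos d (pvPriciest prices g.1)

theorem pv_step (prices : PySem.Dict String Int) (hndp : prices.keys.Nodup)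
    (gs' : List (String × Int × Int)) (g : String × Int × Int) (m : Int)
    (d : PySem.Dict String Int) (hsz : g.2.1 ≠ 0)
    (hpos : 1 ≤ g.2.1 → pvPos d (pvPriciest prices g.1)) (hnod : d.keys.Nodup)
    (hinv : pvInv prices gs' d) :
    pvGroupStepA prices (m, d) g = pvGroupStepB prices (m, d) g
    ∧ pvInv prices gs' (pvGroupStepB prices (m, d) g).2
    ∧ (pvGroupStepB prices (m, d) g).2.keys.Nodup := by
  have hpldef : pvPriciest prices g.1 =
      (PySem.List.sorted (prices.items.filter (fun p => PySem.Str.isIn p.1 g.1))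
        (fun p => p.2) true).map (fun p => p.1) := rfl
  by_cases hneg : g.2.1 ≤ 0
  · -- negative size: A attempts nothing and adds 0; B skips the group
    have hstepB : pvGroupStepB prices (m, d) g = (m, d) := by
      unfold pvGroupStepB
      rw [if_pos hneg]
    have hcp : pvCountPriciest d (pvPriciest prices g.1) g.2.1 = (0, d) := by
      unfold pvCountPriciest
      rw [pvMultibuyLoop]
      have ht : g.2.1.toNat = 0 := by omega
      rw [ht]
      show (if (((0 : Int), d).1 == g.2.1) = true then _ else ((0 : Int), d)) = ((0 : Int), d)
      rw [if_neg (by simp; omega)]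
    have hstepA : pvGroupStepA prices (m, d) g = (m, d) := by
      show (m + (pvCountPriciest d (pvPriciest prices g.1) g.2.1).1 * g.2.2,
            (pvCountPriciest d (pvPriciest prices g.1) g.2.1).2) = (m, d)
      rw [hcp]
      show (m + 0 * g.2.2, d) = (m, d)
      rw [show m + 0 * g.2.2 = m from by ring]
    rw [hstepA, hstepB]
    exact ⟨rfl, hinv, hnod⟩
  · -- positive size: the closed form
    have hsz1 : 1 ≤ g.2.1 := by omega
    have hpos' := hpos hsz1
    have hndpl := pv_priciest_nodup prices hndp g.1
    have hT0 : 0 ≤ pvS d (pvPriciest prices g.1) := pv_pvS_nonneg _ _ hpos'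
    have hM := pv_multibuy (pvPriciest prices g.1) hndpl g.2.1 (by omega)
      ((pvS d (pvPriciest prices g.1)).toNat + 1) d hpos' hnod (by omega)
    have hcp : pvCountPriciest d (pvPriciest prices g.1) g.2.1 =
        (PySem.Int.floordiv (pvS d (pvPriciest prices g.1)) g.2.1,
          pvBulk d (pvPriciest prices g.1)
            (g.2.1 * PySem.Int.floordiv (pvS d (pvPriciest prices g.1)) g.2.1)) := by
      unfold pvCountPriciest
      exact hM
    have havail : ((PySem.List.sorted (prices.items.filter (fun p => PySem.Str.isIn p.1 g.1))
        (fun p => p.2) true).map (fun p => d.getD p.1 0)).sum = pvS d (pvPriciest prices g.1) := by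
      rw [pvS, hpldef, List.map_map]
      rfl
    have hstepA : pvGroupStepA prices (m, d) g =
        (m + PySem.Int.floordiv (pvS d (pvPriciest prices g.1)) g.2.1 * g.2.2,
          pvBulk d (pvPriciest prices g.1)
            (g.2.1 * PySem.Int.floordiv (pvS d (pvPriciest prices g.1)) g.2.1)) := by
      show (m + (pvCountPriciest d (pvPriciest prices g.1) g.2.1).1 * g.2.2,
            (pvCountPriciest d (pvPriciest prices g.1) g.2.1).2) = _
      rw [hcp]
    have hstepB : pvGroupStepB prices (m, d) g =
        (m + PySem.Int.floordiv (pvS d (pvPriciest prices g.1)) g.2.1 * g.2.2,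
          pvBulk d (pvPriciest prices g.1)
            (g.2.1 * PySem.Int.floordiv (pvS d (pvPriciest prices g.1)) g.2.1)) := by
      unfold pvGroupStepB
      rw [if_neg hneg]
      show (m + _ * g.2.2, pvConsume d _ _) = _
      rw [pv_consume_eq_bulk, ← hpldef, havail]
    -- facts about the new dict
    have hq0 : 0 ≤ PySem.Int.floordiv (pvS d (pvPriciest prices g.1)) g.2.1 := by
      rw [PySem.Int.floordiv_eq_ediv_of_pos (by omega)]
      exact Int.ediv_nonneg hT0 (by omega)
    have hmul_le : g.2.1 * PySem.Int.floordiv (pvS d (pvPriciest prices g.1)) g.2.1 ≤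
        pvS d (pvPriciest prices g.1) := by
      rw [PySem.Int.floordiv_eq_ediv_of_pos (by omega)]
      conv_rhs => rw [← Int.mul_ediv_add_emod (pvS d (pvPriciest prices g.1)) g.2.1]
      have := Int.emod_nonneg (pvS d (pvPriciest prices g.1)) (show g.2.1 ≠ 0 from hsz)
      omega
    obtain ⟨hposn, hnodn, houtn⟩ := pv_bulk_inv (pvPriciest prices g.1) hndpl
      (g.2.1 * PySem.Int.floordiv (pvS d (pvPriciest prices g.1)) g.2.1) d hpos' hnod
      (by positivity) hmul_le
    refine ⟨hstepA.trans hstepB.symm, ?_, by rw [hstepB]; exact hnodn⟩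
    rw [hstepB]
    intro g' hg' hsz' s hsmem hscont
    by_cases hsin : s ∈ pvPriciest prices g.1
    · exact hposn s hsin hscont
    · have hget := houtn s hsin
      rw [PySem.Dict.getD_eq_get?_getD, hget, ← PySem.Dict.getD_eq_get?_getD]
      apply hinv g' hg' hsz' s hsmem
      rw [PySem.Dict.contains_eq_isSome_get?, ← hget, ← PySem.Dict.contains_eq_isSome_get?]
      exact hscont

theorem pv_fold (prices : PySem.Dict String Int) (hndp : prices.keys.Nodup) :
    ∀ (gs : List (String × Int × Int)) (m : Int) (d : PySem.Dict String Int),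
    (∀ g ∈ gs, g.2.1 ≠ 0) → pvInv prices gs d → d.keys.Nodup →
    gs.foldl (pvGroupStepA prices) (m, d) = gs.foldl (pvGroupStepB prices) (m, d) := by
  intro gs
  induction gs with
  | nil => intros; rfl
  | cons g gs ih =>
    intro m d hsz hinv hnod
    rw [List.foldl_cons, List.foldl_cons]
    have hinv' : pvInv prices gs d := fun g' hg' => hinv g' (by simp [hg'])
    obtain ⟨hstep, hinv2, hnod2⟩ := pv_step prices hndp gs g m d (hsz g (by simp))
      (fun h => hinv g (by simp) h) hnod hinv'
    rw [hstep]
    have hrec := ih (pvGroupStepB prices (m, d) g).1 (pvGroupStepB prices (m, d) g).2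
      (fun g' hg' => hsz g' (by simp [hg'])) hinv2 hnod2
    simpa using hrec

-- ===== VERDICT (by name: the statement is the Claim_ definition above) =====
theorem checkout_compute_grouped_sku_cost_spec : Claim_equal_checkout_compute_grouped_sku_cost := by
  unfold Claim_equal_checkout_compute_grouped_sku_cost
  intro counts groups prices _hdom hpre
  unfold Pre_checkout_compute_grouped_sku_cost at hpre
  unfold Spec_checkout_compute_grouped_sku_cost
  have hinv0 : pvInv (PySem.Dict.ofList prices) (PySem.Dict.ofList groups).items
      (PySem.Dict.ofList counts) := by
    intro g hg hsz s hs hcont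
    obtain ⟨hc, hiin⟩ := pv_mem_priciest (PySem.Dict.ofList prices) g.1 s hs
    rw [PySem.Dict.contains_eq_isSome_get?] at hcont
    cases hq : (PySem.Dict.ofList counts).get? s with
    | none => rw [hq] at hcont; cases hcont
    | some c =>
      rw [PySem.Dict.getD_of_get?_eq_some _ _ hq]
      exact (hpre g hg).2 hsz (s, c) (PySem.Dict.mem_items_of_get?_eq_some _ hq) ⟨hc, hiin⟩
  have hfold := pv_fold (PySem.Dict.ofList prices) (PySem.Dict.nodup_keys_ofList prices)
    (PySem.Dict.ofList groups).items 0 (PySem.Dict.ofList counts)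
    (fun g hg => (hpre g hg).1) hinv0 (PySem.Dict.nodup_keys_ofList counts)
  simp only [checkout_compute_grouped_sku_cost, checkout_compute_grouped_sku_cost_alt]
  rw [hfold]
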